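-- pv_equiv track=rewrite | github.com/Spiritumx/rag | evaluate/upper_bound_analysis/retriever_recall_upperbound/analyze_recall.py | _analyze_question_types
-- ===== SOURCE A (Python) =====
-- from typing import List, Dict, Any
-- from collections import defaultdict, Counter
--
-- def _analyze_question_types(cases: List[Dict]) -> Dict[str, int]:
--     """分析问题类型分布"""
--     question_types = defaultdict(int)
--
--     for case in cases:
--         question = case['question'].lower()
--
--         if question.startswith('what'):
--             question_types['what'] += 1
--         elif question.startswith('who'):
--             question_types['who'] += 1
--         elif question.startswith('when'):
--             question_types['when'] += 1
--         elif question.startswith('where'):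
--             question_types['where'] += 1
--         elif question.startswith('why'):
--             question_types['why'] += 1
--         elif question.startswith('how'):
--             question_types['how'] += 1
--         elif question.startswith('which'):
--             question_types['which'] += 1
--         else:
--             question_types['other'] += 1
--
--     return dict(question_types)
-- ===== SOURCE B (Python) =====
-- from typing import List, Dict
--
--
-- def _classify(q):
--     # decision tree on individual characters instead of trying prefixes one by one
--     if q[:2] == 'wh':
--         c = q[2:3]
--         if c == 'a':
--             return 'what' if q[3:4] == 't' else 'other'
--         if c == 'o':
--             return 'who'
--         if c == 'y':
--             return 'why'
--         if c == 'e':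
--             c = q[3:4]
--             if c == 'n':
--                 return 'when'
--             if c == 'r':
--                 return 'where' if q[4:5] == 'e' else 'other'
--             return 'other'
--         if c == 'i':
--             return 'which' if q[3:5] == 'ch' else 'other'
--         return 'other'
--     return 'how' if q[:3] == 'how' else 'other'
--
--
-- def _analyze_question_types(cases: List[Dict]) -> Dict[str, int]:
--     cats = [_classify(case['question'].lower()) for case in cases]
--     result = {}
--     while cats:
--         c = cats[0]
--         result[c] = cats.count(c)
--         cats = [x for x in cats if x != c]
--     return result
-- ===== Notes on version B (the rewrite author's own statement) =====
-- stated objective: alternative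
-- what changed: Classification is a hand-built character decision tree over slices (branching on q[2], q[3], ...) instead of trying the seven prefixes in order, and the distribution is built by a group-by-first-occurrence loop (count the first category, filter it out, repeat) instead of incrementing a dict per element.
import Mathlib
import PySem

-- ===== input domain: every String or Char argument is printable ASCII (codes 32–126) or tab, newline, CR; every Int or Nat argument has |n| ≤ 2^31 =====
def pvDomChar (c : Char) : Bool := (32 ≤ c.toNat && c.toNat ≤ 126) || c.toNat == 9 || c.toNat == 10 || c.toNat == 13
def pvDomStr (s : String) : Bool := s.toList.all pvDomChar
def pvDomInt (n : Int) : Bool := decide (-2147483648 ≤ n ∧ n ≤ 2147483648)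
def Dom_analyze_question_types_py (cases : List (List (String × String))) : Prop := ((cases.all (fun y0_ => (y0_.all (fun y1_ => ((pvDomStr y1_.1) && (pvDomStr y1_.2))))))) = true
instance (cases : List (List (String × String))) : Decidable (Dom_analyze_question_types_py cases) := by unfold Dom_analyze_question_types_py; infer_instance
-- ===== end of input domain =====

-- B classifies each question by a character-level decision tree over slices and builds the
-- distribution by a group-by-first-occurrence count/filter loop (alternative algorithm, same cost class).


-- ===== PORT A =====
-- literal transliteration of A: defaultdict(int) updated by an if/elif chain, then dict(...)
def analyze_question_types_py (cases : List (List (String × String))) : List (String × Int) :=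
  (cases.foldl (fun d case =>
      let q := PySem.Str.lower ((PySem.Dict.mk case).getD "question" "")
      if PySem.Str.startswith q "what" then d.modify "what" 0 (· + 1)
      else if PySem.Str.startswith q "who" then d.modify "who" 0 (· + 1)
      else if PySem.Str.startswith q "when" then d.modify "when" 0 (· + 1)
      else if PySem.Str.startswith q "where" then d.modify "where" 0 (· + 1)
      else if PySem.Str.startswith q "why" then d.modify "why" 0 (· + 1)
      else if PySem.Str.startswith q "how" then d.modify "how" 0 (· + 1)
      else if PySem.Str.startswith q "which" then d.modify "which" 0 (· + 1)
      else d.modify "other" 0 (· + 1))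
    (PySem.Dict.empty : PySem.Dict String Int)).items

-- ===== PORT B =====
-- _classify: Python string slices q[a:b] and '==' are ported exactly as PySem.List.slice on q.toList
-- (string slicing/equality is elementwise on the character list).
def pvClassify (q : String) : String :=
  let cs := q.toList
  if PySem.List.slice cs none (some 2) = ['w', 'h'] then
    let c := PySem.List.slice cs (some 2) (some 3)
    if c = ['a'] then (if PySem.List.slice cs (some 3) (some 4) = ['t'] then "what" else "other")
    else if c = ['o'] then "who"
    else if c = ['y'] then "why"
    else if c = ['e'] then
      let c3 := PySem.List.slice cs (some 3) (some 4)
      if c3 = ['n'] then "when"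
      else if c3 = ['r'] then (if PySem.List.slice cs (some 4) (some 5) = ['e'] then "where" else "other")
      else "other"
    else if c = ['i'] then (if PySem.List.slice cs (some 3) (some 5) = ['c', 'h'] then "which" else "other")
    else "other"
  else if PySem.List.slice cs none (some 3) = ['h', 'o', 'w'] then "how" else "other"

-- the while loop: take the first category, record its count, drop all its occurrences, repeat
def pvGroupLoop : List String → PySem.Dict String Int → PySem.Dict String Int
  | [], result => result
  | c :: t, result =>
      pvGroupLoop ((c :: t).filter (fun x => x != c)) (result.insert c ((c :: t).count c : Int))
termination_by cats _ => cats.length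
decreasing_by
  simp
  have := List.length_filter_le (fun x => x != c) t
  omega

def analyze_question_types_py_alt (cases : List (List (String × String))) : List (String × Int) :=
  let cats := cases.map (fun case =>
    pvClassify (PySem.Str.lower ((PySem.Dict.mk case).getD "question" "")))
  (pvGroupLoop cats PySem.Dict.empty).items

-- ===== PRECONDITION & SPEC =====
-- Pre_ excludes cases that lack a 'question' key, on which Python A raises KeyError.
def Pre_analyze_question_types_py (cases : List (List (String × String))) : Prop :=
  (cases.all (fun case => (PySem.Dict.mk case).contains "question")) = true
instance (cases : List (List (String × String))) : Decidable (Pre_analyze_question_types_py cases) := by unfold Pre_analyze_question_types_py; infer_instance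

def pvWitness_analyze_question_types_py : (List (List (String × String))) :=
  [[("question", "What is recall?")], [("question", "zebra?")]]

def Spec_analyze_question_types_py (cases : List (List (String × String))) (out : List (String × Int)) : Prop := out = analyze_question_types_py_alt cases
instance (cases : List (List (String × String))) (out : List (String × Int)) : Decidable (Spec_analyze_question_types_py cases out) := by unfold Spec_analyze_question_types_py; infer_instance

-- ===== CLAIM (what is proved, stated in full; the proofs are below) =====
def Claim_equal_analyze_question_types_py : Prop := ∀ (cases : List (List (String × String))), Dom_analyze_question_types_py cases → Pre_analyze_question_types_py cases → Spec_analyze_question_types_py cases (analyze_question_types_py cases)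

-- ===== LEMMAS AND PROOFS =====

-- A's if/elif chain updates the dict exactly at B's decision-tree category of q.
set_option maxHeartbeats 1000000 in
lemma step_eq_modify_classify (d : PySem.Dict String Int) (q : String) :
    (if PySem.Str.startswith q "what" then d.modify "what" 0 (· + 1)
      else if PySem.Str.startswith q "who" then d.modify "who" 0 (· + 1)
      else if PySem.Str.startswith q "when" then d.modify "when" 0 (· + 1)
      else if PySem.Str.startswith q "where" then d.modify "where" 0 (· + 1)
      else if PySem.Str.startswith q "why" then d.modify "why" 0 (· + 1)
      else if PySem.Str.startswith q "how" then d.modify "how" 0 (· + 1)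
      else if PySem.Str.startswith q "which" then d.modify "which" 0 (· + 1)
      else d.modify "other" 0 (· + 1))
      = d.modify (pvClassify q) 0 (· + 1) := by
  unfold pvClassify
  simp only [PySem.Str.startswith,
    (by decide : "what".toList = ['w','h','a','t']),
    (by decide : "who".toList = ['w','h','o']),
    (by decide : "when".toList = ['w','h','e','n']),
    (by decide : "where".toList = ['w','h','e','r','e']),
    (by decide : "why".toList = ['w','h','y']),
    (by decide : "how".toList = ['h','o','w']),
    (by decide : "which".toList = ['w','h','i','c','h'])]
  generalize q.toList = cs
  rcases cs with _|⟨a,_|⟨b,_|⟨c,_|⟨e,_|⟨f,rest⟩⟩⟩⟩⟩ <;>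
    simp [PySem.Chars.startswith, PySem.List.slice, PySem.List.clampIdx, List.take, List.drop] <;>
    split_ifs <;> simp_all [@eq_comm Char]

-- adding elements already-filtered away of c into a set containing c skips nothing new at c
lemma foldl_add_skip {α : Type} [BEq α] [LawfulBEq α] (l : List α) (s : PySem.Set α) (c : α)
    (h : c ∈ s) :
    l.foldl PySem.Set.add s = (l.filter (fun x => x != c)).foldl PySem.Set.add s := by
  induction l generalizing s with
  | nil => rfl
  | cons x l ih =>
      by_cases hx : x = c
      · subst hx
        have : PySem.Set.add s x = s := by
          simp [PySem.Set.add, h]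
        simp [this, ih s h]
      · have hc : c ∈ PySem.Set.add s x := by
          simp [PySem.Set.add]; split_ifs <;> simp [h]
        simp [hx, ih _ hc]

-- a head element absent from the rest stays at the head of the accumulating set
lemma foldl_add_cons {α : Type} [BEq α] [LawfulBEq α] (l : List α) (s : PySem.Set α) (c : α)
    (h : ∀ x ∈ l, x ≠ c) :
    l.foldl PySem.Set.add (c :: s) = c :: l.foldl PySem.Set.add s := by
  induction l generalizing s with
  | nil => rfl
  | cons x l ih =>
      have hx : x ≠ c := h x (by simp)
      have : PySem.Set.add (c :: s) x = c :: PySem.Set.add s x := by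
        simp [PySem.Set.add, hx]
        split_ifs <;> simp_all
      rw [List.foldl_cons, this, List.foldl_cons, ih _ (fun y hy => h y (by simp [hy]))]

-- first occurrences of c :: t are c followed by the first occurrences of t with c removed
lemma ofList_cons_filter {α : Type} [BEq α] [LawfulBEq α] (c : α) (t : List α) :
    PySem.Set.ofList (c :: t) = c :: PySem.Set.ofList (t.filter (fun x => x != c)) := by
  unfold PySem.Set.ofList
  rw [List.foldl_cons]
  have h1 : PySem.Set.add PySem.Set.empty c = [c] := rfl
  rw [h1, foldl_add_skip t [c] c (by simp)]
  exact foldl_add_cons _ ([] : PySem.Set α) c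
    (fun x hx => by simpa [bne_iff_ne] using (List.mem_filter.mp hx).2)

-- group-by-first-occurrence over fresh keys appends each distinct category with its count
lemma groupLoop_items (cats : List String) (d : PySem.Dict String Int)
    (hnd : d.keys.Nodup) (hfresh : ∀ c ∈ cats, d.contains c = false) :
    (pvGroupLoop cats d).items
      = d.items ++ (PySem.Set.ofList cats).map (fun k => (k, (cats.count k : Int))) := by
  induction cats, d using pvGroupLoop.induct with
  | case1 result => simp [pvGroupLoop, PySem.Set.ofList]
  | case2 c t result ih =>
      rw [pvGroupLoop]
      have hc : result.contains c = false := hfresh c (by simp)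
      have hnd' : (result.insert c ((c :: t).count c : Int)).keys.Nodup :=
        PySem.Dict.nodup_keys_insert _ _ _ hnd
      have hfresh' : ∀ x ∈ (c :: t).filter (fun x => x != c),
          (result.insert c ((c :: t).count c : Int)).contains x = false := by
        intro x hx
        have hxc : x ≠ c := by simpa [bne_iff_ne] using (List.mem_filter.mp hx).2
        have hxm : x ∈ c :: t := (List.mem_filter.mp hx).1
        rw [PySem.Dict.contains_insert]
        simp [hxc, hfresh x hxm]
      rw [ih hnd' hfresh']
      rw [PySem.Dict.items_insert_of_not_contains _ _ hc]
      have hfc : (c :: t).filter (fun x => x != c) = t.filter (fun x => x != c) := by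
        simp
      rw [hfc, ofList_cons_filter c t]
      simp only [List.map_cons, List.append_assoc, List.cons_append, List.nil_append]
      congr 2
      apply List.map_congr_left
      intro k hk
      have hkt : k ∈ t.filter (fun x => x != c) := by
        have := PySem.Set.mem_ofList (t.filter (fun x => x != c)) k |>.mp hk
        exact this
      have hkc : k ≠ c := by simpa [bne_iff_ne] using (List.mem_filter.mp hkt).2
      have : (t.filter (fun x => x != c)).count k = t.count k := by
        rw [List.count_filter]
        simp [bne_iff_ne, hkc]
      simp [List.count_cons, this]
      exact Ne.symm hkc

-- ===== VERDICT (by name: the statement is the Claim_ definition above) =====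
theorem analyze_question_types_py_spec : Claim_equal_analyze_question_types_py := by
  intro cases hdom hpre
  clear hdom hpre
  show analyze_question_types_py cases = analyze_question_types_py_alt cases
  unfold analyze_question_types_py analyze_question_types_py_alt
  have hA : (cases.foldl (fun d case =>
      let q := PySem.Str.lower ((PySem.Dict.mk case).getD "question" "")
      if PySem.Str.startswith q "what" then d.modify "what" 0 (· + 1)
      else if PySem.Str.startswith q "who" then d.modify "who" 0 (· + 1)
      else if PySem.Str.startswith q "when" then d.modify "when" 0 (· + 1)
      else if PySem.Str.startswith q "where" then d.modify "where" 0 (· + 1)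
      else if PySem.Str.startswith q "why" then d.modify "why" 0 (· + 1)
      else if PySem.Str.startswith q "how" then d.modify "how" 0 (· + 1)
      else if PySem.Str.startswith q "which" then d.modify "which" 0 (· + 1)
      else d.modify "other" 0 (· + 1))
    (PySem.Dict.empty : PySem.Dict String Int))
      = PySem.Dict.counter (cases.map (fun case =>
          pvClassify (PySem.Str.lower ((PySem.Dict.mk case).getD "question" "")))) := by
    rw [PySem.Dict.counter_eq_foldl, List.foldl_map]
    apply PySem.List.foldl_congr_mem
    intro d case _
    exact step_eq_modify_classify d _
  rw [hA, PySem.Dict.items_counter]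
  rw [groupLoop_items _ _ (by simp) (by simp [PySem.Dict.contains_empty])]
  rfl
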